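-- pv_equiv track=rewrite | github.com/costantinoai/spyder-ai-assistant | src/spyder_ai_assistant/utils/runtime_context.py | _remove_contiguous_subsequence
-- ===== SOURCE A (Python) =====
-- def _remove_contiguous_subsequence(lines, subsequence):
--     if not subsequence or len(subsequence) > len(lines):
--         return list(lines)
--
--     for start in range(len(lines) - len(subsequence), -1, -1):
--         if lines[start:start + len(subsequence)] == subsequence:
--             remaining = lines[:start] + lines[start + len(subsequence):]
--             return _strip_surrounding_blank_lines(remaining)
--     return list(lines)
--
-- def _strip_surrounding_blank_lines(lines):
--     if isinstance(lines, str):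
--         lines = lines.split("\n")
--
--     start = 0
--     end = len(lines)
--     while start < end and not str(lines[start]).strip():
--         start += 1
--     while end > start and not str(lines[end - 1]).strip():
--         end -= 1
--     return list(lines[start:end])
-- ===== SOURCE B (Python) =====
-- def _blank(line):
--     return not str(line).strip()
--
-- def _drop_leading_blanks(ls):
--     while ls and _blank(ls[0]):
--         ls = ls[1:]
--     return ls
--
-- def _remove_contiguous_subsequence(lines, subsequence):
--     n, m = len(lines), len(subsequence)
--     if not subsequence or m > n:
--         return list(lines)
--     best = None
--     for k in range(n - m + 1):
--         if lines[k:k + m] == subsequence: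
--             best = k
--     if best is None:
--         return list(lines)
--     remaining = lines[:best] + lines[best + m:]
--     remaining = _drop_leading_blanks(remaining)
--     return _drop_leading_blanks(remaining[::-1])[::-1]
-- ===== Notes on version B (the rewrite author's own statement) =====
-- stated objective: alternative
-- what changed: B finds the last occurrence with a single forward left-to-right pass that keeps the latest match (instead of A's backward index scan with early return) and strips blank lines by structural peeling plus reversal (instead of A's two index-based while-loops with slicing).
import Mathlib
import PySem

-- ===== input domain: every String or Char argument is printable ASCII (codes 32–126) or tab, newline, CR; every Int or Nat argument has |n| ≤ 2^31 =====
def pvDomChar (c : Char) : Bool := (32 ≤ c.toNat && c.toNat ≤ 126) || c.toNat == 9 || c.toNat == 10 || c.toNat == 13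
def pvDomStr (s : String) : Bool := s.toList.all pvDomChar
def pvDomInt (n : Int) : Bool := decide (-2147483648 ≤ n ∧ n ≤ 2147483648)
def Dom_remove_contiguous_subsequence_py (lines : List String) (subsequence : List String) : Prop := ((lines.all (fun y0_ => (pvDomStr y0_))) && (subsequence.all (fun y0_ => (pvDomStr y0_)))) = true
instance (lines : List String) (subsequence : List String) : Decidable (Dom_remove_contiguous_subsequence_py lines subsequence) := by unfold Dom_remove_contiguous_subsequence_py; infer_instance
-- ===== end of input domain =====

-- B replaces A's backward early-return index scan and index-based while-loop stripping by a
-- forward pass keeping the last match and blank-stripping by peeling/reversal (objective: alternative).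

-- ===== PORT A =====

-- `not str(x).strip()` on a string argument (str() is the identity on strings)
def pyBlankA (s : String) : Bool := PySem.Str.strip s == ""

-- `while start < end and not str(lines[start]).strip(): start += 1`
-- (lines[start] is in range whenever tested: start < e ≤ len lines; pyGetD is exact there)
def aStart (lines : List String) (e : Nat) (s : Nat) : Nat :=
  if s < e ∧ pyBlankA (PySem.List.pyGetD lines (s : Int) "") then aStart lines e (s + 1) else s
termination_by e - s

-- `while end > start and not str(lines[end - 1]).strip(): end -= 1`
def aEnd (lines : List String) (s : Nat) : Nat → Nat
  | 0 => 0
  | e + 1 =>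
    if s < e + 1 ∧ pyBlankA (PySem.List.pyGetD lines (e : Int) "") then aEnd lines s e else e + 1

-- `_strip_surrounding_blank_lines` (argument is always a list here, never a str)
def aStrip (lines : List String) : List String :=
  let s := aStart lines lines.length 0
  let e := aEnd lines s lines.length
  (lines.take e).drop s   -- lines[start:end], exact: 0 ≤ s ≤ e ≤ len

-- `for start in range(len(lines) - len(subsequence), -1, -1)` with early return:
-- the obvious countdown recursion over the same start values; lines[start:start+m]
-- is (lines.drop start).take m, exact since 0 ≤ start and start+m ≤ len lines.
def aScan (lines subsequence : List String) : Nat → Option Nat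
  | 0 => if (lines.drop 0).take subsequence.length == subsequence then some 0 else none
  | s + 1 =>
    if (lines.drop (s + 1)).take subsequence.length == subsequence then some (s + 1)
    else aScan lines subsequence s

def remove_contiguous_subsequence_py (lines : List String) (subsequence : List String) : List String :=
  if subsequence = [] ∨ subsequence.length > lines.length then lines
  else
    match aScan lines subsequence (lines.length - subsequence.length) with
    | some start => aStrip (lines.take start ++ lines.drop (start + subsequence.length))
    | none => lines

-- ===== PORT B =====

-- `not str(line).strip()`
def pyBlankB (s : String) : Bool := PySem.Str.strip s == ""

-- `while ls and _blank(ls[0]): ls = ls[1:]`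
def bDrop : List String → List String
  | [] => []
  | x :: t => if pyBlankB x then bDrop t else x :: t

def remove_contiguous_subsequence_py_alt (lines : List String) (subsequence : List String) : List String :=
  let n := lines.length
  let m := subsequence.length
  if subsequence = [] ∨ m > n then lines
  else
    -- `for k in range(n - m + 1): if lines[k:k+m] == subsequence: best = k`
    let best := (List.range (n - m + 1)).foldl
      (fun best k => if (lines.drop k).take m == subsequence then some k else best) none
    match best with
    | none => lines
    | some k =>
      let remaining := lines.take k ++ lines.drop (k + m)
      (bDrop (bDrop remaining).reverse).reverse

-- ===== PRECONDITION & SPEC =====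
def Spec_remove_contiguous_subsequence_py (lines : List String) (subsequence : List String) (out : List String) : Prop := out = remove_contiguous_subsequence_py_alt lines subsequence
instance (lines : List String) (subsequence : List String) (out : List String) : Decidable (Spec_remove_contiguous_subsequence_py lines subsequence out) := by unfold Spec_remove_contiguous_subsequence_py; infer_instance

-- ===== CLAIM (what is proved, stated in full; the proofs are below) =====
def Claim_equal_remove_contiguous_subsequence_py : Prop := ∀ (lines : List String) (subsequence : List String), Dom_remove_contiguous_subsequence_py lines subsequence → Spec_remove_contiguous_subsequence_py lines subsequence (remove_contiguous_subsequence_py lines subsequence)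

-- ===== LEMMAS AND PROOFS =====

theorem blank_eq : pyBlankB = pyBlankA := rfl

-- B's keep-last fold over 0..s equals A's first-match countdown from s.
theorem foldl_last_eq_scan (lines subsequence : List String) (s : Nat) :
    (List.range (s + 1)).foldl
      (fun best k => if (lines.drop k).take subsequence.length == subsequence then some k else best) none
    = aScan lines subsequence s := by
  induction s with
  | zero => simp [aScan, List.range_succ]
  | succ s ih =>
    rw [List.range_succ, List.foldl_append, ih]
    simp only [List.foldl, aScan]

-- bDrop is dropWhile.
theorem bDrop_eq_dropWhile (ls : List String) : bDrop ls = ls.dropWhile pyBlankA := by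
  induction ls with
  | nil => rfl
  | cons x t ih =>
    by_cases h : pyBlankA x = true <;>
      simp [bDrop, List.dropWhile, blank_eq, h, ih]

theorem aStart_le (lines : List String) (e s : Nat) (hs : s ≤ e) : aStart lines e s ≤ e := by
  fun_induction aStart with
  | case1 s hc ih => exact ih (by omega)
  | case2 s hc => exact hs

theorem getD_in_range (lines : List String) (i : Nat) (hi : i < lines.length) :
    PySem.List.pyGetD lines (i : Int) "" = lines[i] := by
  simp [PySem.List.pyGetD, PySem.List.pyGet?, PySem.List.pyIdx?, hi]

-- A's leading while-loop computes dropWhile of the suffix.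
theorem aStart_drop (lines : List String) (e s : Nat) (he : e = lines.length) (hs : s ≤ e) :
    lines.drop (aStart lines e s) = (lines.drop s).dropWhile pyBlankA := by
  fun_induction aStart with
  | case1 s hc ih =>
    obtain ⟨hlt, hb⟩ := hc
    have hsl : s < lines.length := by omega
    rw [ih (by omega)]
    rw [List.drop_eq_getElem_cons hsl, List.dropWhile_cons]
    rw [getD_in_range lines s hsl] at hb
    simp [hb]
  | case2 s hc =>
    rcases Nat.lt_or_ge s e with hlt | hge
    · -- s < e, so the blank test failed: head is not blank
      have hb : ¬ pyBlankA (PySem.List.pyGetD lines (s : Int) "") = true := by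
        intro hb; exact hc ⟨hlt, hb⟩
      have hsl : s < lines.length := by omega
      rw [List.drop_eq_getElem_cons hsl, List.dropWhile_cons]
      rw [getD_in_range lines s hsl] at hb
      simp [hb]
    · -- s = e = length: both sides empty
      have hsl : s = lines.length := by omega
      simp [hsl, List.drop_length, List.dropWhile_nil]

theorem take_succ_drop (lines : List String) (s e : Nat) (hel : e < lines.length) (hse : s ≤ e) :
    (lines.take (e + 1)).drop s = (lines.take e).drop s ++ [lines[e]] := by
  have hlen : s ≤ (lines.take e).length := by
    rw [List.length_take]; omega
  rw [List.take_add_one, List.getElem?_eq_getElem hel, Option.toList_some,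
    List.drop_append_of_le_length hlen]

-- A's trailing while-loop computes reversed dropWhile of the reversed prefix.
theorem aEnd_take (lines : List String) (s e : Nat) (he : e ≤ lines.length) (hs : s ≤ e) :
    (lines.take (aEnd lines s e)).drop s
    = ((((lines.take e).drop s).reverse.dropWhile pyBlankA).reverse) := by
  induction e with
  | zero =>
    have hz : s = 0 := by omega
    simp [aEnd, hz]
  | succ e ih =>
    simp only [aEnd]
    split
    · rename_i h
      obtain ⟨hlt, hb⟩ := h
      have hel : e < lines.length := by omega
      rw [take_succ_drop lines s e hel (by omega), ih (by omega) (by omega)]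
      rw [getD_in_range lines e hel] at hb
      simp [hb]
    · rename_i h
      rcases Nat.lt_or_ge s (e + 1) with hlt | hge
      · -- test on the last element failed: it is not blank
        have hb : ¬ pyBlankA (PySem.List.pyGetD lines (e : Int) "") = true := by
          intro hb; exact h ⟨hlt, hb⟩
        have hel : e < lines.length := by omega
        rw [take_succ_drop lines s e hel (by omega)]
        rw [getD_in_range lines e hel] at hb
        simp [hb]
      · -- s = e + 1: both sides empty
        have h1 : (lines.take (e + 1)).drop s = [] := by
          apply List.drop_eq_nil_of_le; rw [List.length_take]; omega
        rw [h1]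
        simp
    
-- A's strip equals B's strip.
theorem strip_eq (ls : List String) :
    aStrip ls = (bDrop ((bDrop ls).reverse)).reverse := by
  rw [bDrop_eq_dropWhile, bDrop_eq_dropWhile]
  unfold aStrip
  have hsle : aStart ls ls.length 0 ≤ ls.length := aStart_le ls ls.length 0 (by omega)
  have hstart : ls.drop (aStart ls ls.length 0) = ls.dropWhile pyBlankA := by
    simpa using aStart_drop ls ls.length 0 rfl (by omega)
  have h := aEnd_take ls (aStart ls ls.length 0) ls.length le_rfl hsle
  rw [List.take_length] at h
  rw [h, hstart]

-- ===== VERDICT (by name: the statement is the Claim_ definition above) =====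
theorem remove_contiguous_subsequence_py_spec : Claim_equal_remove_contiguous_subsequence_py := by
  intro lines subsequence _
  unfold Spec_remove_contiguous_subsequence_py
  unfold remove_contiguous_subsequence_py remove_contiguous_subsequence_py_alt
  by_cases h : subsequence = [] ∨ subsequence.length > lines.length
  · simp [h]
  · simp only [h, if_false]
    rw [show lines.length - subsequence.length + 1
        = (lines.length - subsequence.length) + 1 from rfl, foldl_last_eq_scan]
    cases hscan : aScan lines subsequence (lines.length - subsequence.length) with
    | none => rfl
    | some k => simpa using strip_eq (lines.take k ++ lines.drop (k + subsequence.length))
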